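-- pv_equiv track=rewrite | github.com/emmaeng700/leetcodemr | generate_print_6up.py | _preprocess_backticks
-- ===== SOURCE A (Python) =====
-- def _preprocess_backticks(content):
--     codes, result, i = [], [], 0
--     n = len(content)
--     while i < n:
--         if content[i] == "`":
--             j = i + 1
--             while j < n and content[j] != "`":
--                 j += 1
--             codes.append(content[i+1:j])
--             result.append(f"[CODE{len(codes)-1}]")
--             i = j + 1
--         else:
--             result.append(content[i])
--             i += 1
--     return "".join(result), codes
-- ===== SOURCE B (Python) =====
-- def _preprocess_backticks(content):
--     parts = content.split('`')
--     buf, codes = [], []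
--     for idx, part in enumerate(parts):
--         if idx % 2 == 0:
--             buf.append(part)
--         else:
--             buf.append(f"[CODE{len(codes)}]")
--             codes.append(part)
--     return "".join(buf), codes
-- ===== Notes on version B (the rewrite author's own statement) =====
-- stated objective: idiomatic
-- what changed: Replaced the index-based while-loop with an inner scan-for-closing-backtick state machine by a single str.split on the backtick character followed by one index-parity pass over the parts (even parts verbatim, odd parts become codes).
import Mathlib
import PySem

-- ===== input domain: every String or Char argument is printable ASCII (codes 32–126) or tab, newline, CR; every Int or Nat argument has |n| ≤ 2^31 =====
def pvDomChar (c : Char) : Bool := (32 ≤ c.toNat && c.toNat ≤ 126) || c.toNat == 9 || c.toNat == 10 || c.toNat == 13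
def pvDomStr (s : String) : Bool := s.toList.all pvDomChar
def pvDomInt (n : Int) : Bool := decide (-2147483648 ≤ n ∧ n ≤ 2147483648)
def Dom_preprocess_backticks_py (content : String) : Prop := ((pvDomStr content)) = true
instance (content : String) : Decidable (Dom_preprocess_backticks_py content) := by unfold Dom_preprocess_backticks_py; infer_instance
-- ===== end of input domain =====

-- B replaces A's index-based scan-for-closing-backtick state machine by a delimiter split plus an
-- index-parity pass over the parts (objective: simpler/idiomatic; same asymptotic cost).

-- ===== PORT A =====
-- inner while loop: scan for the next backtick; returns (content[i+1:j], the chars after position j)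
def pvScanA : List Char → List Char × List Char
  | [] => ([], [])
  | c :: cs =>
    if c = '`' then ([], cs)
    else
      let r := pvScanA cs
      (c :: r.1, r.2)

theorem pvScanA_len (l : List Char) : (pvScanA l).2.length ≤ l.length := by
  induction l with
  | nil => simp [pvScanA]
  | cons c cs ih => simp only [pvScanA]; split <;> simp <;> omega

-- outer while loop of A, with the accumulators `codes`, `result`
def pvGoA : List Char → List String → List String → List String × List String
  | [], codes, result => (result, codes)
  | c :: rest, codes, result =>
    if c = '`' then
      let codes' := codes ++ [String.ofList (pvScanA rest).1]
      pvGoA (pvScanA rest).2 codes'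
        (result ++ ["[CODE" ++ PySem.Int.toStr ((codes'.length : Int) - 1) ++ "]"])
    else
      pvGoA rest codes (result ++ [String.ofList [c]])
  termination_by l _ _ => l.length
  decreasing_by
  · exact Nat.lt_succ_of_le (pvScanA_len rest)
  · simp

def preprocess_backticks_py (content : String) : String × List String :=
  let r := pvGoA content.toList [] []
  (PySem.Str.join "" r.1, r.2)

-- ===== PORT B =====
-- loop body of B's `for idx, part in enumerate(parts)`
def pvStepB (st : List String × List String) (ip : Int × String) : List String × List String :=
  if PySem.Int.mod ip.1 2 == 0 then (st.1 ++ [ip.2], st.2)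
  else (st.1 ++ ["[CODE" ++ PySem.Int.toStr (st.2.length : Int) ++ "]"], st.2 ++ [ip.2])

def preprocess_backticks_py_alt (content : String) : String × List String :=
  -- content.split('`'): PySem.Str.split? equals Chars.splitOn for this nonempty literal separator
  let parts := (PySem.Chars.splitOn content.toList "`".toList).map String.ofList
  let st := (PySem.List.enumerate parts).foldl pvStepB ([], [])
  (PySem.Str.join "" st.1, st.2)

-- ===== PRECONDITION & SPEC =====
def Spec_preprocess_backticks_py (content : String) (out : String × List String) : Prop := out = preprocess_backticks_py_alt content
instance (content : String) (out : String × List String) : Decidable (Spec_preprocess_backticks_py content out) := by unfold Spec_preprocess_backticks_py; infer_instance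

-- ===== CLAIM (what is proved, stated in full; the proofs are below) =====
def Claim_equal_preprocess_backticks_py : Prop := ∀ (content : String), Dom_preprocess_backticks_py content → Spec_preprocess_backticks_py content (preprocess_backticks_py content)

-- ===== LEMMAS AND PROOFS =====

-- the mathematical form of split-on-backtick
def pvParts : List Char → List (List Char)
  | [] => [[]]
  | c :: rest =>
    if c = '`' then [] :: pvParts rest
    else
      match pvParts rest with
      | [] => [[c]]
      | p :: ps => (c :: p) :: ps

theorem pvParts_ne_nil (l : List Char) : pvParts l ≠ [] := by
  cases l with
  | nil => simp [pvParts]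
  | cons c rest => simp only [pvParts]; split <;> [simp; split <;> simp]

def pvConsHead (pre : List Char) : List (List Char) → List (List Char)
  | [] => [pre]
  | p :: ps => (pre ++ p) :: ps

theorem pvGo_spec (fuel : Nat) : ∀ (l cur : List Char) (acc : List (List Char)), l.length ≤ fuel →
    PySem.Chars.splitOn.go ['`'] fuel l cur acc = acc.reverse ++ pvConsHead cur.reverse (pvParts l) := by
  induction fuel with
  | zero =>
    intro l cur acc h
    have : l = [] := by cases l <;> simp_all
    subst this
    simp [PySem.Chars.splitOn.go, pvParts, pvConsHead]
  | succ fuel ih =>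
    intro l cur acc h
    cases l with
    | nil => simp [PySem.Chars.splitOn.go, pvParts, pvConsHead]
    | cons c rest =>
      simp only [PySem.Chars.splitOn.go]
      by_cases hc : c = '`'
      · subst hc
        rw [if_pos (by simp)]
        simp only [List.length_cons, List.length_nil, List.drop_succ_cons, List.drop_zero]
        rw [ih rest [] (cur.reverse :: acc) (by simpa using Nat.le_of_succ_le_succ h)]
        simp only [pvParts, if_pos rfl, pvConsHead]
        have hne := pvParts_ne_nil rest
        cases hp : pvParts rest with
        | nil => exact absurd hp hne
        | cons p ps => simp [pvConsHead]
      · rw [if_neg (by simp [Ne.symm hc])]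
        rw [ih rest (c :: cur) acc (by simpa using Nat.le_of_succ_le_succ h)]
        simp only [pvParts, if_neg hc]
        cases hp : pvParts rest with
        | nil => exact absurd hp (pvParts_ne_nil rest)
        | cons p ps => simp [pvConsHead]

theorem pvSplitOn_eq (l : List Char) : PySem.Chars.splitOn l ['`'] = pvParts l := by
  show PySem.Chars.splitOn.go ['`'] (l.length + 1) l [] [] = pvParts l
  rw [pvGo_spec (l.length + 1) l [] [] (by omega)]
  have hne := pvParts_ne_nil l
  cases hp : pvParts l with
  | nil => exact absurd hp hne
  | cons p ps => simp [pvConsHead]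

-- A's loop, rephrased to produce the suffixes it appends (k = current len(codes))
def pvAP : List Char → Nat → List String × List String
  | [], _ => ([], [])
  | c :: rest, k =>
    if c = '`' then
      let r := pvAP (pvScanA rest).2 (k + 1)
      (("[CODE" ++ PySem.Int.toStr (k : Int) ++ "]") :: r.1, String.ofList (pvScanA rest).1 :: r.2)
    else
      let r := pvAP rest k
      (String.ofList [c] :: r.1, r.2)
  termination_by l _ => l.length
  decreasing_by
  · exact Nat.lt_succ_of_le (pvScanA_len rest)
  · simp

theorem pvGoA_spec (n : Nat) : ∀ (l : List Char), l.length ≤ n → ∀ (codes result : List String),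
    pvGoA l codes result = (result ++ (pvAP l codes.length).1, codes ++ (pvAP l codes.length).2) := by
  induction n with
  | zero =>
    intro l h codes result
    have : l = [] := by cases l <;> simp_all
    subst this; simp [pvGoA, pvAP]
  | succ n ih =>
    intro l h codes result
    cases l with
    | nil => simp [pvGoA, pvAP]
    | cons c rest =>
      by_cases hc : c = '`'
      · subst hc
        rw [pvGoA, if_pos rfl, pvAP]
        rw [ih (pvScanA rest).2 (by have := pvScanA_len rest; simp at h ⊢; omega)]
        simp only [List.length_append, List.length_cons, List.length_nil]
        have hk : ((codes.length + (0 + 1) : Nat) : Int) - 1 = (codes.length : Int) := by push_cast; ring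
        rw [hk]
        simp
      · rw [pvGoA, if_neg hc, pvAP]
        rw [ih rest (by simp at h; omega)]
        simp [hc]

-- B's loop, rephrased to produce the suffixes it appends
def pvPB : List String → Int → Nat → List String × List String
  | [], _, _ => ([], [])
  | p :: ps, i, k =>
    if PySem.Int.mod i 2 == 0 then
      let r := pvPB ps (i + 1) k
      (p :: r.1, r.2)
    else
      let r := pvPB ps (i + 1) (k + 1)
      (("[CODE" ++ PySem.Int.toStr (k : Int) ++ "]") :: r.1, p :: r.2)

theorem pvFoldB_spec (ps : List String) : ∀ (i : Int) (buf codes : List String),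
    (PySem.List.enumerate ps i).foldl pvStepB (buf, codes)
      = (buf ++ (pvPB ps i codes.length).1, codes ++ (pvPB ps i codes.length).2) := by
  induction ps with
  | nil => intro i buf codes; simp [PySem.List.enumerate, pvPB]
  | cons p ps ih =>
    intro i buf codes
    have he : PySem.List.enumerate (p :: ps) i = (i, p) :: PySem.List.enumerate ps (i + 1) := by
      simp [PySem.List.enumerate]
    rw [he, List.foldl_cons]
    by_cases hi : PySem.Int.mod i 2 == 0
    · simp only [pvStepB, if_pos hi, pvPB]
      rw [ih]; simp [hi]
    · simp only [pvStepB, if_neg hi, pvPB]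
      rw [ih]; simp [hi]

theorem pvJoin_nil_flatten (l : List (List Char)) : PySem.Chars.join [] l = l.flatten := by
  simp only [PySem.Chars.join, List.intercalate]
  induction l with
  | nil => simp
  | cons x xs ih => cases xs <;> simp_all [List.intersperse]

theorem pvFmod_succ_ne (i : Int) (h : i.fmod 2 = 0) : ¬ (i + 1).fmod 2 = 0 := by
  rw [Int.fmod_eq_emod] at *; omega

theorem pvFmod_succ_succ (i : Int) (h : i.fmod 2 = 0) : (i + 1 + 1).fmod 2 = 0 := by
  rw [Int.fmod_eq_emod] at *; omega

-- pvParts of a list vs the first-backtick scan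
theorem pvParts_scan (l : List Char) :
    ('`' ∈ l ∧ pvParts l = (pvScanA l).1 :: pvParts (pvScanA l).2)
      ∨ ('`' ∉ l ∧ pvScanA l = (l, []) ∧ pvParts l = [l]) := by
  induction l with
  | nil => right; simp [pvScanA, pvParts]
  | cons c cs ih =>
    by_cases hc : c = '`'
    · subst hc; left; simp [pvScanA, pvParts]
    · rcases ih with ⟨hmem, hp⟩ | ⟨hmem, hs, hp⟩
      · left
        refine ⟨List.mem_cons_of_mem _ hmem, ?_⟩
        simp only [pvScanA, if_neg hc, pvParts, hp]
      · right
        refine ⟨?_, ?_, ?_⟩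
        · intro hmm
          rcases List.mem_cons.1 hmm with h | h
          · exact hc h.symm
          · exact hmem h
        · simp [pvScanA, if_neg hc, hs]
        · simp only [pvParts, if_neg hc, hp]

-- the bridge: at an even index, B's segment pass and A's char pass agree after joining
theorem pvBridge (n : Nat) : ∀ (l : List Char), l.length ≤ n → ∀ (k : Nat) (i : Int), i.fmod 2 = 0 →
    ((pvPB ((pvParts l).map String.ofList) i k).1.map String.toList).flatten
        = ((pvAP l k).1.map String.toList).flatten
      ∧ (pvPB ((pvParts l).map String.ofList) i k).2 = (pvAP l k).2 := by
  induction n with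
  | zero =>
    intro l h k i hi
    have : l = [] := by cases l <;> simp_all
    subst this
    simp [pvParts, pvPB, pvAP, PySem.Int.mod, hi]
  | succ n ih =>
    intro l h k i hi
    have hodd : ¬ (PySem.Int.mod (i + 1) 2 == 0) = true := by
      simp [PySem.Int.mod, pvFmod_succ_ne i hi]
    have hev : (PySem.Int.mod i 2 == 0) = true := by simp [PySem.Int.mod, hi]
    cases l with
    | nil => simp [pvParts, pvPB, pvAP, PySem.Int.mod, hi]
    | cons c rest =>
      by_cases hc : c = '`'
      · subst hc
        rcases pvParts_scan rest with ⟨hmem, hp⟩ | ⟨hmem, hs, hp⟩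
        · have hlen : (pvScanA rest).2.length ≤ n := by
            have := pvScanA_len rest; simp at h; omega
          obtain ⟨hj, hcodes⟩ := ih (pvScanA rest).2 hlen (k + 1) (i + 1 + 1) (pvFmod_succ_succ i hi)
          simp only [pvParts, if_pos rfl, hp, List.map_cons]
          rw [pvAP]
          simp [pvPB, PySem.Int.mod, hi, pvFmod_succ_ne i hi, hj, hcodes]
        · simp only [pvParts, if_pos rfl, hp, hs]
          rw [pvAP]
          simp [pvPB, pvAP, PySem.Int.mod, hi, pvFmod_succ_ne i hi, hs]
      · obtain ⟨hj, hcodes⟩ := ih rest (by simp at h; omega) k i hi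
        have hne := pvParts_ne_nil rest
        cases hp : pvParts rest with
        | nil => exact absurd hp hne
        | cons p ps =>
          rw [hp] at hj hcodes
          simp only [pvParts, if_neg hc, hp, List.map_cons]
          rw [pvAP]
          simp only [if_neg hc]
          simp [pvPB, PySem.Int.mod, hi] at hj hcodes ⊢
          simp [hj, hcodes]

-- ===== VERDICT (by name: the statement is the Claim_ definition above) =====
theorem preprocess_backticks_py_spec : Claim_equal_preprocess_backticks_py := by
  intro content _
  unfold Spec_preprocess_backticks_py preprocess_backticks_py preprocess_backticks_py_alt
  have hA := pvGoA_spec content.toList.length content.toList le_rfl [] []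
  have hB := pvFoldB_spec ((pvParts content.toList).map String.ofList) 0 [] []
  have hsplit : PySem.Chars.splitOn content.toList "`".toList = pvParts content.toList := by
    have : "`".toList = ['`'] := by decide
    rw [this]; exact pvSplitOn_eq _
  obtain ⟨hj, hcodes⟩ := pvBridge content.toList.length content.toList le_rfl 0 0 (by decide)
  simp only [hsplit, hB, hA, List.nil_append, List.length_nil]
  refine Prod.ext ?_ ?_
  · show PySem.Str.join "" (pvAP content.toList 0).1
        = PySem.Str.join "" (pvPB ((pvParts content.toList).map String.ofList) 0 0).1
    simp only [PySem.Str.join]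
    have h0 : "".toList = ([] : List Char) := by decide
    rw [h0, pvJoin_nil_flatten, pvJoin_nil_flatten, hj]
  · exact hcodes.symm
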